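-- pv_equiv track=rewrite | github.com/Crypto-Moonboys/Crypto-Moonboys.github.io | sam-wiki-publisher.py | normalize_legacy_paths
-- ===== SOURCE A (Python) =====
-- def normalize_legacy_paths(html: str) -> str:
--     """Rewrite fragile relative nav/asset paths to root-relative equivalents.
--
--     This function must be called on any HTML content sourced from git history
--     or copied from an older commit before it is written to disk.  Older commits
--     used paths like ``../css/``, ``../js/``, ``../img/``, and ``../index.html``
--     which break when the page is served from a sub-directory such as ``/wiki/``.
--     Applying these replacements ensures legacy files cannot reintroduce fragile
--     relative paths into the repository.
--     """
--     replacements = [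
--         ("../index.html",    "/index.html"),
--         ("../search.html",   "/search.html"),
--         ("../articles.html", "/articles.html"),
--         ("../about.html",    "/about.html"),
--         ("../categories/",   "/categories/"),
--         ("../css/",          "/css/"),
--         ("../js/",           "/js/"),
--         ("../img/",          "/img/"),
--     ]
--     for old, new in replacements:
--         html = html.replace(old, new)
--     return html
-- ===== SOURCE B (Python) =====
-- def normalize_legacy_paths(html: str) -> str:
--     """Single left-to-right scan: at each position, rewrite '../<known suffix>'
--     to '/<known suffix>', otherwise copy the character.  One pass over the
--     string instead of eight sequential whole-string replace passes (and no
--     cascading of one replacement into a later pattern's match)."""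
--     suffixes = ("index.html", "search.html", "articles.html", "about.html",
--                 "categories/", "css/", "js/", "img/")
--     out = []
--     i = 0
--     n = len(html)
--     while i < n:
--         matched = None
--         if html.startswith("../", i):
--             for s in suffixes:
--                 if html.startswith(s, i + 3):
--                     matched = s
--                     break
--         if matched is not None:
--             out.append("/" + matched)
--             i += 3 + len(matched)
--         else:
--             out.append(html[i])
--             i += 1
--     return "".join(out)
-- ===== Notes on version B (the rewrite author's own statement) =====
-- stated objective: alternative
-- what changed: B rewrites every '../<known suffix>' occurrence in one left-to-right scan of the string instead of A's eight sequential whole-string str.replace passes, so the output of one replacement can never feed a later pattern.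
-- intended difference: On inputs containing one of the 22 cascade substrings '../<dir-suffix-minus-slash>' immediately followed by a later-processed pattern (e.g. '../js../css/'), A's earlier replace creates a match that a later replace then rewrites ('/js/css/'), while B leaves the text that was not a pattern in the input alone ('../js/css/'); B's value is intended because A's cascade is an accident of the fixed pass order (the mirror-image input '../css../js/' is NOT cascaded by A). — e.g. on normalize_legacy_paths("../js../css/"): A returns "/js/css/", B returns "../js/css/"
import Mathlib
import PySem

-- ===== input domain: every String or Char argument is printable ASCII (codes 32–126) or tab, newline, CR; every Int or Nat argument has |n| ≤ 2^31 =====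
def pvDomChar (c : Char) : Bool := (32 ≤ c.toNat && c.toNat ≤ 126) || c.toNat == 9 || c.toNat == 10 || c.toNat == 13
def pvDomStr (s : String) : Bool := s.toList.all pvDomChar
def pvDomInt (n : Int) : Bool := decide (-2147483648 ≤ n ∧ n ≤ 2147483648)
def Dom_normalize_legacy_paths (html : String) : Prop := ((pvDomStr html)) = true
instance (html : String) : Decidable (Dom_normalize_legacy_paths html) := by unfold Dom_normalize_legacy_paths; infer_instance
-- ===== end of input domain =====

-- B replaces A's eight sequential whole-string replace passes by a single left-to-right
-- scan; on the "cascade" inputs (D_ below) A's passes feed each other and B intentionally differs.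

-- ===== PORT A =====
-- the function's local `replacements` list, in order
def pvReplacements : List (String × String) :=
  [("../index.html",    "/index.html"),
   ("../search.html",   "/search.html"),
   ("../articles.html", "/articles.html"),
   ("../about.html",    "/about.html"),
   ("../categories/",   "/categories/"),
   ("../css/",          "/css/"),
   ("../js/",           "/js/"),
   ("../img/",          "/img/")]

def normalize_legacy_paths (html : String) : String :=
  pvReplacements.foldl (fun h p => PySem.Str.replace h p.1 p.2) html

-- ===== PORT B =====
-- the eight known suffixes, in Source B's tuple order
def pvSuffixes : List (List Char) :=
  ["index.html".toList, "search.html".toList, "articles.html".toList, "about.html".toList,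
   "categories/".toList, "css/".toList, "js/".toList, "img/".toList]

-- Source B's inner test: html.startswith("../", i) and the first suffix s with html.startswith(s, i+3)
def pvMatchAt (l : List Char) : Option (List Char) :=
  if ['.', '.', '/'].isPrefixOf l then pvSuffixes.find? (fun s => s.isPrefixOf (l.drop 3))
  else none

-- Source B's while loop over positions i < n, written as structural recursion on the remaining
-- characters with the remaining length (n - i) as structural fuel: on a match emit "/"+s and
-- jump 3+len(s) characters, otherwise copy one character (exact for fuel ≥ length, as used).
def pvScanGo : ℕ → List Char → List Char
  | _, [] => []
  | 0, l => l
  | fuel + 1, c :: t =>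
    match pvMatchAt (c :: t) with
    | some s => '/' :: (s ++ pvScanGo fuel (t.drop (2 + s.length)))
    | none => c :: pvScanGo fuel t

def normalize_legacy_paths_alt (html : String) : String :=
  String.ofList (pvScanGo html.toList.length html.toList)

-- ===== PRECONDITION & SPEC =====
-- On inputs containing one of these 22 substrings ('../<dir suffix minus its slash>'
-- directly followed by a pattern that A processes earlier), A's earlier replace pass
-- creates a fresh '../<dir>/' occurrence that a later pass then also rewrites, while B only
-- rewrites patterns present in the input; B's value is intended because A's cascade is an
-- accident of its fixed pass order (the mirror-image input is not cascaded by A).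
-- the pattern replaced in pass j, as its character list
def pvOldAt (k : ℕ) : List Char := (pvReplacements.getD k default).1.toList

-- rows 4..7 of the replacement table are exactly the directory patterns '../…/'
def D_normalize_legacy_paths (html : String) : Prop :=
  ∃ j < 8, ∃ i < j, 4 ≤ j ∧
    PySem.Str.isIn (String.ofList ((pvOldAt j).dropLast ++ pvOldAt i)) html = true

instance (html : String) : Decidable (D_normalize_legacy_paths html) := by
  unfold D_normalize_legacy_paths; infer_instance

def Spec_normalize_legacy_paths (html : String) (out : String) : Prop :=
  ¬ D_normalize_legacy_paths html → out = normalize_legacy_paths_alt html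

instance (html : String) (out : String) : Decidable (Spec_normalize_legacy_paths html out) := by
  unfold Spec_normalize_legacy_paths; infer_instance

def pvDiffWitness_normalize_legacy_paths : String := "../js../css/"

def pvDiffWitnessOut_normalize_legacy_paths : String × String := ("/js/css/", "../js/css/")

-- ===== CLAIM (what is proved, stated in full; the proofs are below) =====
def Claim_unchanged_normalize_legacy_paths : Prop :=
  ∀ (html : String), Dom_normalize_legacy_paths html →
    Spec_normalize_legacy_paths html (normalize_legacy_paths html)

def Claim_changed_normalize_legacy_paths : Prop :=
  Dom_normalize_legacy_paths (pvDiffWitness_normalize_legacy_paths) ∧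
  D_normalize_legacy_paths (pvDiffWitness_normalize_legacy_paths) ∧
  normalize_legacy_paths (pvDiffWitness_normalize_legacy_paths) = pvDiffWitnessOut_normalize_legacy_paths.1 ∧
  normalize_legacy_paths_alt (pvDiffWitness_normalize_legacy_paths) = pvDiffWitnessOut_normalize_legacy_paths.2 ∧
  pvDiffWitnessOut_normalize_legacy_paths.1 ≠ pvDiffWitnessOut_normalize_legacy_paths.2

def Claim_exact_normalize_legacy_paths : Prop :=
  ∀ (html : String), Dom_normalize_legacy_paths html → D_normalize_legacy_paths html →
    normalize_legacy_paths html ≠ normalize_legacy_paths_alt html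

-- ===== LEMMAS AND PROOFS =====

-- ---------- generic prefix utilities ----------

theorem pvPrefixOfAppendOfLe {a b u : List Char} (h : a <+: b ++ u)
    (hl : a.length ≤ b.length) : a <+: b := by
  obtain ⟨t, ht⟩ := h
  have h1 : List.take a.length (a ++ t) = a := by
    rw [List.take_append_of_le_length le_rfl, List.take_length]
  rw [ht, List.take_append_of_le_length hl] at h1
  exact h1 ▸ List.take_prefix a.length b

theorem pvSplit3 {p b u : List Char} (h : p <+: b ++ u) :
    p <+: b ∨ (b <+: p ∧ p.drop b.length <+: u) := by
  rcases Nat.le_total p.length b.length with hl | hl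
  · exact Or.inl (pvPrefixOfAppendOfLe h hl)
  · rcases Nat.eq_or_lt_of_le hl with he | hl
    · exact Or.inl (pvPrefixOfAppendOfLe h (by omega))
    right
    have hb : b <+: p := by
      rcases List.prefix_or_prefix_of_prefix h (List.prefix_append b u) with h1 | h1
      · exact absurd (List.IsPrefix.length_le h1) (by omega)
      · exact h1
    refine ⟨hb, ?_⟩
    obtain ⟨w, rfl⟩ := hb
    rw [List.drop_append_of_le_length le_rfl, List.drop_length, List.nil_append]
    exact (List.prefix_append_right_inj b).mp h

theorem pvAppendPrefixMono {w v : List Char} (b : List Char) (h : w <+: v) :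
    b ++ w <+: b ++ v :=
  (List.prefix_append_right_inj b).mpr h

theorem pvPrefixRecompose {b p : List Char} (h : b <+: p) :
    b ++ p.drop b.length = p := by
  obtain ⟨t, rfl⟩ := h
  rw [List.drop_append_of_le_length le_rfl, List.drop_length, List.nil_append]

theorem pvPrefixDrop {a b : List Char} (k : ℕ) (hk : k ≤ a.length) (h : a <+: b) :
    a.drop k <+: b.drop k := by
  obtain ⟨t, rfl⟩ := h
  rw [List.drop_append_of_le_length hk]
  exact List.prefix_append _ _

theorem pvPrefixOfDropInfix {a l : List Char} (q : ℕ) (h : a <+: l.drop q) : a <:+: l :=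
  h.isInfix.trans (List.drop_suffix q l).isInfix

-- ---------- the by-hand leftmost non-overlapping replace, and its bridge to PySem ----------

def pvRep (o n : List Char) : List Char → List Char
  | [] => []
  | c :: t =>
    if o.isPrefixOf (c :: t) then n ++ pvRep o n (t.drop (o.length - 1))
    else c :: pvRep o n t
termination_by l => l.length
decreasing_by
  · simp only [List.length_drop, List.length_cons]; omega
  · simp only [List.length_cons]; omega

theorem pvRep_nil (o n : List Char) : pvRep o n [] = [] := by
  simp [pvRep]

theorem pvGo_eq_rep (o n : List Char) (ho : o ≠ []) :
    ∀ (fuel : ℕ) (l acc : List Char), l.length ≤ fuel →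
      PySem.Chars.replace.go o n fuel l acc = acc.reverse ++ pvRep o n l := by
  intro fuel
  induction fuel with
  | zero =>
    intro l acc hl
    have : l = [] := by cases l <;> simp_all
    subst this
    simp [PySem.Chars.replace.go, pvRep_nil]
  | succ fuel ih =>
    intro l acc hl
    cases l with
    | nil => simp [PySem.Chars.replace.go, pvRep_nil]
    | cons c t =>
      rw [PySem.Chars.replace.go]
      by_cases hp : o.isPrefixOf (c :: t)
      · rw [if_pos hp]
        obtain ⟨k, hk⟩ : ∃ k, o.length = k + 1 := by
          cases o with
          | nil => exact absurd rfl ho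
          | cons a b => exact ⟨b.length, rfl⟩
        have hdrop : (c :: t).drop o.length = t.drop (o.length - 1) := by
          rw [hk]; simp
        rw [hdrop]
        rw [ih (t.drop (o.length - 1)) (n.reverse ++ acc)
          (by simp only [List.length_drop, List.length_cons] at hl ⊢; omega)]
        rw [pvRep, if_pos hp]
        simp
      · rw [if_neg hp]
        rw [ih t (c :: acc) (by simp only [List.length_cons] at hl; omega)]
        rw [pvRep, if_neg hp]
        simp

theorem pvReplace_eq_rep (s o n : List Char) (ho : o ≠ []) :
    PySem.Chars.replace s o n = pvRep o n s := by
  unfold PySem.Chars.replace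
  rw [if_neg (by simpa using ho)]
  rw [pvGo_eq_rep o n ho s.length s [] le_rfl]
  simp

theorem pvStrReplace_toList (s o n : String) (ho : o.toList ≠ []) :
    (PySem.Str.replace s o n).toList = pvRep o.toList n.toList s.toList := by
  unfold PySem.Str.replace
  rw [String.toList_ofList, pvReplace_eq_rep _ _ _ ho]

-- pvRep copies a region in which no occurrence of `o` starts
theorem pvRep_append (o n : List Char) :
    ∀ (pre suf : List Char), (∀ q < pre.length, ¬ o <+: (pre ++ suf).drop q) →
      pvRep o n (pre ++ suf) = pre ++ pvRep o n suf := by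
  intro pre
  induction pre with
  | nil => intro suf _; simp
  | cons c pre ih =>
    intro suf h
    have h0 : ¬ o <+: (c :: (pre ++ suf)) := by
      have := h 0 (by simp)
      simpa using this
    rw [List.cons_append, pvRep, if_neg (by rw [List.isPrefixOf_iff_prefix]; exact h0)]
    rw [ih suf (by
      intro q hq
      have := h (q + 1) (by simpa using Nat.succ_lt_succ hq)
      simpa using this)]
    rfl

theorem pvRep_head (o n u : List Char) (ho : o ≠ []) :
    pvRep o n (o ++ u) = n ++ pvRep o n u := by
  cases o with
  | nil => exact absurd rfl ho
  | cons c o' =>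
    rw [List.cons_append, pvRep,
      if_pos (by rw [List.isPrefixOf_iff_prefix]; exact List.prefix_append _ _)]
    congr 1
    have h1 : (c :: o').length - 1 = o'.length := by simp
    rw [h1, List.drop_append_of_le_length le_rfl, List.drop_length, List.nil_append]

-- the chain of the eight replaces, on lists
def pvPat (s : List Char) : List Char := '.' :: '.' :: '/' :: s

def pvF (h : List Char) (s : List Char) : List Char := pvRep (pvPat s) ('/' :: s) h

def pvChain (l : List Char) : List Char := pvSuffixes.foldl pvF l

theorem pvA_toList (html : String) :
    (normalize_legacy_paths html).toList = pvChain html.toList := by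
  have e1 : ("../index.html" : String).toList = pvPat ("index.html".toList) := by decide
  have e2 : ("../search.html" : String).toList = pvPat ("search.html".toList) := by decide
  have e3 : ("../articles.html" : String).toList = pvPat ("articles.html".toList) := by decide
  have e4 : ("../about.html" : String).toList = pvPat ("about.html".toList) := by decide
  have e5 : ("../categories/" : String).toList = pvPat ("categories/".toList) := by decide
  have e6 : ("../css/" : String).toList = pvPat ("css/".toList) := by decide
  have e7 : ("../js/" : String).toList = pvPat ("js/".toList) := by decide
  have e8 : ("../img/" : String).toList = pvPat ("img/".toList) := by decide
  have f1 : ("/index.html" : String).toList = '/' :: ("index.html".toList) := by decide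
  have f2 : ("/search.html" : String).toList = '/' :: ("search.html".toList) := by decide
  have f3 : ("/articles.html" : String).toList = '/' :: ("articles.html".toList) := by decide
  have f4 : ("/about.html" : String).toList = '/' :: ("about.html".toList) := by decide
  have f5 : ("/categories/" : String).toList = '/' :: ("categories/".toList) := by decide
  have f6 : ("/css/" : String).toList = '/' :: ("css/".toList) := by decide
  have f7 : ("/js/" : String).toList = '/' :: ("js/".toList) := by decide
  have f8 : ("/img/" : String).toList = '/' :: ("img/".toList) := by decide
  simp only [normalize_legacy_paths, pvReplacements, pvChain, pvSuffixes, pvF, List.foldl]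
  rw [pvStrReplace_toList _ _ _ (by decide), pvStrReplace_toList _ _ _ (by decide),
    pvStrReplace_toList _ _ _ (by decide), pvStrReplace_toList _ _ _ (by decide),
    pvStrReplace_toList _ _ _ (by decide), pvStrReplace_toList _ _ _ (by decide),
    pvStrReplace_toList _ _ _ (by decide), pvStrReplace_toList _ _ _ (by decide)]
  rw [e1, e2, e3, e4, e5, e6, e7, e8, f1, f2, f3, f4, f5, f6, f7, f8]

-- ---------- decidable facts about the eight literal patterns ----------

theorem pvF1 : ∀ a ∈ pvSuffixes, ∀ b ∈ pvSuffixes, a <+: b → a = b := by decide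

theorem pvF2a : ∀ s ∈ pvSuffixes, ∀ s' ∈ pvSuffixes, s' ≠ s →
    ∀ e < (pvPat s).length, ¬ pvPat s' <+: (pvPat s).drop e := by decide

theorem pvF2b : ∀ s ∈ pvSuffixes, ∀ s' ∈ pvSuffixes,
    ∀ e < (pvPat s).length, (1 ≤ e ∨ s' ≠ s) → ¬ (pvPat s).drop e <+: pvPat s' := by decide

theorem pvF3 : ∀ s ∈ pvSuffixes, ∀ d < (pvPat s).length, 1 ≤ d →
    ¬ ['.', '.'] <+: (pvPat s).drop d := by decide

theorem pvF4 : ∀ s ∈ pvSuffixes, ∀ d < (pvPat s).length, 1 ≤ d →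
    ((pvPat s).drop d).head? = some '/' →
    d = 2 ∨ (d = (pvPat s).length - 1 ∧ (pvPat s).getLast? = some '/') := by decide

theorem pvF5 : ∀ a ∈ pvSuffixes, ∀ b ∈ pvSuffixes, ∀ e < ('/' :: a).length,
    ¬ pvPat b <+: ('/' :: a).drop e ∧ ¬ ('/' :: a).drop e <+: pvPat b := by decide

def pvPairsAfter {α : Type} : List α → List (α × α)
  | [] => []
  | a :: r => (r.map (fun b => (a, b))) ++ pvPairsAfter r

def pvCascadeSubsL : List (List Char) :=
  ["../categories../index.html".toList,
   "../categories../search.html".toList,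
   "../categories../articles.html".toList,
   "../categories../about.html".toList,
   "../css../index.html".toList,
   "../css../search.html".toList,
   "../css../articles.html".toList,
   "../css../about.html".toList,
   "../css../categories/".toList,
   "../js../index.html".toList,
   "../js../search.html".toList,
   "../js../articles.html".toList,
   "../js../about.html".toList,
   "../js../categories/".toList,
   "../js../css/".toList,
   "../img../index.html".toList,
   "../img../search.html".toList,
   "../img../articles.html".toList,
   "../img../about.html".toList,
   "../img../categories/".toList,
   "../img../css/".toList,
   "../img../js/".toList]

theorem pvF6 : ∀ p ∈ pvPairsAfter pvSuffixes, (pvPat p.2).getLast? = some '/' →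
    ((pvPat p.2).dropLast ++ pvPat p.1) ∈ pvCascadeSubsL := by decide

theorem pvNodup : pvSuffixes.Nodup := by decide

theorem pvAfter_mem {α : Type} : ∀ (t₁ : List α) (l t₂ : List α) (a b : α),
    l = t₁ ++ a :: t₂ → b ∈ t₂ → (a, b) ∈ pvPairsAfter l := by
  intro t₁
  induction t₁ with
  | nil =>
    intro l t₂ a b hl hb
    subst hl
    simp only [List.nil_append, pvPairsAfter, List.mem_append, List.mem_map]
    exact Or.inl ⟨b, hb, rfl⟩
  | cons c t₁ ih =>
    intro l t₂ a b hl hb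
    subst hl
    simp only [List.cons_append, pvPairsAfter, List.mem_append]
    exact Or.inr (ih _ t₂ a b rfl hb)

-- ---------- matchAt characterisations ----------

theorem pvMatchAt_nil : pvMatchAt [] = none := by decide

theorem pvMatchAt_none_imp {w : List Char} (h : pvMatchAt w = none) :
    ∀ s' ∈ pvSuffixes, ¬ pvPat s' <+: w := by
  intro s' hs' hp
  unfold pvMatchAt at h
  have hc : (['.', '.', '/'].isPrefixOf w) = true := by
    rw [List.isPrefixOf_iff_prefix]
    exact List.IsPrefix.trans ⟨s', rfl⟩ hp
  rw [if_pos hc] at h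
  apply List.find?_eq_none.mp h s' hs'
  rw [List.isPrefixOf_iff_prefix]
  have h3 := pvPrefixDrop 3 (by simp [pvPat]) hp
  simpa [pvPat] using h3

theorem pvMatchAt_some {l s : List Char} (h : pvMatchAt l = some s) :
    s ∈ pvSuffixes ∧ pvPat s <+: l := by
  unfold pvMatchAt at h
  by_cases hc : (['.', '.', '/'].isPrefixOf l) = true
  · rw [if_pos hc] at h
    refine ⟨List.mem_of_find?_eq_some h, ?_⟩
    have hps := List.find?_some h
    rw [List.isPrefixOf_iff_prefix] at hps
    rw [List.isPrefixOf_iff_prefix] at hc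
    obtain ⟨t, rfl⟩ := hc
    have hdt : (['.', '.', '/'] ++ t).drop 3 = t := by simp
    rw [hdt] at hps
    exact pvAppendPrefixMono (b := ['.', '.', '/']) hps
  · rw [if_neg hc] at h; cases h

theorem pvMatchAt_pat (s : List Char) (hs : s ∈ pvSuffixes) (rest : List Char) :
    pvMatchAt (pvPat s ++ rest) = some s := by
  unfold pvMatchAt
  rw [if_pos (by rw [List.isPrefixOf_iff_prefix]; exact ⟨s ++ rest, by simp [pvPat]⟩)]
  have hdrop : (pvPat s ++ rest).drop 3 = s ++ rest := by simp [pvPat]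
  rw [hdrop]
  have hex : (pvSuffixes.find? (fun s' => s'.isPrefixOf (s ++ rest))).isSome := by
    rw [List.find?_isSome]
    exact ⟨s, hs, by rw [List.isPrefixOf_iff_prefix]; exact List.prefix_append _ _⟩
  obtain ⟨y, hy⟩ := Option.isSome_iff_exists.mp hex
  have hymem := List.mem_of_find?_eq_some hy
  have hyp := List.find?_some hy
  rw [List.isPrefixOf_iff_prefix] at hyp
  have hys : y = s := by
    rcases pvSplit3 hyp with h1 | ⟨h2, _⟩
    · exact pvF1 y hymem s hs h1
    · exact (pvF1 s hs y hymem h2).symm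
  rw [hy, hys]

-- ---------- scan lemmas ----------

def pvScan (l : List Char) : List Char := pvScanGo l.length l

theorem pvScanGo_congr : ∀ (f1 : ℕ) (l : List Char) (f2 : ℕ),
    l.length ≤ f1 → l.length ≤ f2 → pvScanGo f1 l = pvScanGo f2 l := by
  intro f1
  induction f1 with
  | zero =>
    intro l f2 h1 _
    have : l = [] := by cases l <;> simp_all
    subst this
    cases f2 <;> rfl
  | succ f1 ih =>
    intro l f2 h1 h2
    cases l with
    | nil => cases f2 <;> rfl
    | cons c t =>
      cases f2 with
      | zero => simp at h2
      | succ f2 =>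
        rw [pvScanGo, pvScanGo]
        simp only [List.length_cons] at h1 h2
        cases hm : pvMatchAt (c :: t) with
        | some s =>
          simp only []
          rw [ih (t.drop (2 + s.length)) f2
            (by simp only [List.length_drop]; omega)
            (by simp only [List.length_drop]; omega)]
        | none =>
          simp only []
          rw [ih t f2 (by omega) (by omega)]

theorem pvScan_cons_none {c : Char} {t : List Char} (h : pvMatchAt (c :: t) = none) :
    pvScan (c :: t) = c :: pvScan t := by
  unfold pvScan
  simp only [List.length_cons]
  rw [pvScanGo, h]

theorem pvScan_cons_some {c : Char} {t s : List Char} (h : pvMatchAt (c :: t) = some s) :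
    pvScan (c :: t) = '/' :: (s ++ pvScan (t.drop (2 + s.length))) := by
  unfold pvScan
  simp only [List.length_cons]
  rw [pvScanGo, h]
  simp only [List.cons.injEq, true_and]
  congr 1
  exact pvScanGo_congr t.length (t.drop (2 + s.length)) (t.drop (2 + s.length)).length
    (by simp only [List.length_drop]; omega) le_rfl

theorem pvScan_block (s : List Char) (hs : s ∈ pvSuffixes) (rest : List Char) :
    pvScan (pvPat s ++ rest) = ('/' :: s) ++ pvScan rest := by
  have hshape : pvPat s ++ rest = '.' :: ('.' :: '/' :: (s ++ rest)) := by simp [pvPat]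
  have hm : pvMatchAt ('.' :: ('.' :: '/' :: (s ++ rest))) = some s := by
    rw [← hshape]; exact pvMatchAt_pat s hs rest
  rw [hshape, pvScan_cons_some hm]
  have hdrop : ('.' :: '/' :: (s ++ rest)).drop (2 + s.length) = rest := by
    have : ('.' :: '/' :: (s ++ rest)).drop (2 + s.length) = (s ++ rest).drop s.length := by
      rw [show 2 + s.length = s.length + 2 by omega]
      rfl
    rw [this, List.drop_append_of_le_length le_rfl, List.drop_length, List.nil_append]
  rw [hdrop]
  rfl

theorem pvScan_prefix_none :
    ∀ (x v : List Char), (∀ q < x.length, pvMatchAt ((x ++ v).drop q) = none) →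
      pvScan (x ++ v) = x ++ pvScan v := by
  intro x
  induction x with
  | nil => intro v _; rfl
  | cons c x ih =>
    intro v h
    have h0 : pvMatchAt (c :: (x ++ v)) = none := by
      have := h 0 (by simp)
      simpa using this
    rw [List.cons_append, pvScan_cons_none h0]
    rw [ih v (by
      intro q hq
      have := h (q + 1) (by simpa using Nat.succ_lt_succ hq)
      simpa using this)]
    rfl

theorem pvScan_id : ∀ (l : List Char), (∀ q, pvMatchAt (l.drop q) = none) →
    pvScan l = l := by
  intro l
  induction l with
  | nil => intro _; rfl
  | cons c t ih =>
    intro h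
    have h0 : pvMatchAt (c :: t) = none := by have := h 0; simpa using this
    rw [pvScan_cons_none h0, ih (fun q => by have := h (q + 1); simpa using this)]

-- ---------- the no-new-match lemmas for the chain ----------

-- no pattern can start in the region x (which carries no full pattern occurrence),
-- whatever well-shaped block follows it
theorem pvNMB (x s u : List Char) (hsP : s ∈ pvSuffixes)
    (hin : ∀ q, ∀ s'' ∈ pvSuffixes, ¬ pvPat s'' <+: x.drop q) :
    ∀ q < x.length, ∀ s'' ∈ pvSuffixes, ¬ pvPat s'' <+: (x ++ (pvPat s ++ u)).drop q := by
  intro q hq s'' hs'' hp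
  rw [List.drop_append_of_le_length (le_of_lt hq)] at hp
  rcases pvSplit3 hp with h1 | ⟨h2, h3⟩
  · exact hin q s'' hs'' h1
  · have hd1 : 1 ≤ (x.drop q).length := by rw [List.length_drop]; omega
    rcases lt_or_ge (x.drop q).length (pvPat s'').length with hdlt | hdge
    · rcases pvSplit3 h3 with h4 | ⟨h5, _⟩
      · exact pvF2b s'' hs'' s hsP _ hdlt (Or.inl hd1) h4
      · have hdd : ['.', '.'] <+: (pvPat s'').drop (x.drop q).length :=
          List.IsPrefix.trans (⟨'/' :: s, rfl⟩ : ['.', '.'] <+: pvPat s) h5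
        exact pvF3 s'' hs'' _ hdlt hd1 hdd
    · have heq : pvPat s'' <+: x.drop q := by
        rw [List.IsPrefix.eq_of_length_le h2 hdge]
      exact hin q s'' hs'' heq

theorem pvKA (x s s' : List Char) (hsP : s ∈ pvSuffixes) (hs' : s' ∈ pvSuffixes)
    (hne : s' ≠ s)
    (hin : ∀ q, ∀ s'' ∈ pvSuffixes, ¬ pvPat s'' <+: x.drop q) :
    ∀ (u : List Char), ∀ q < x.length + (pvPat s).length,
      ¬ pvPat s' <+: ((x ++ pvPat s) ++ u).drop q := by
  intro u q hq hp
  rcases lt_or_ge q x.length with hqx | hqx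
  · rw [List.append_assoc] at hp
    exact pvNMB x s u hsP hin q hqx s' hs' hp
  · have he : q - x.length < (pvPat s).length := by omega
    have hdl : ((x ++ pvPat s) ++ u).drop q = (pvPat s).drop (q - x.length) ++ u := by
      rw [List.append_assoc, List.drop_append, List.drop_eq_nil_of_le hqx, List.nil_append,
        List.drop_append_of_le_length (le_of_lt he)]
    rw [hdl] at hp
    rcases pvSplit3 hp with h1 | ⟨h2, _⟩
    · exact pvF2a s hsP s' hs' hne _ he h1
    · exact pvF2b s hsP s' hs' _ he (Or.inr hne) h2

theorem pvKC (x s s' : List Char) (hsP : s ∈ pvSuffixes) (hs' : s' ∈ pvSuffixes)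
    (hne : s' ≠ s)
    (hnosite : ¬ ((pvPat s').getLast? = some '/' ∧ (pvPat s').dropLast <:+ x))
    (hin : ∀ q, ∀ s'' ∈ pvSuffixes, ¬ pvPat s'' <+: x.drop q) :
    ∀ (u : List Char), ∀ q < x.length + ('/' :: s).length,
      ¬ pvPat s' <+: ((x ++ ('/' :: s)) ++ u).drop q := by
  intro u q hq hp
  rcases lt_or_ge q x.length with hqx | hqx
  · rw [List.append_assoc, List.drop_append_of_le_length (le_of_lt hqx)] at hp
    rcases pvSplit3 hp with h1 | ⟨h2, h3⟩
    · exact hin q s' hs' h1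
    · have hd1 : 1 ≤ (x.drop q).length := by rw [List.length_drop]; omega
      rcases lt_or_ge (x.drop q).length (pvPat s').length with hdlt | hdge
      · have hw0 : ((pvPat s').drop (x.drop q).length).head? = some '/' := by
          cases hw : (pvPat s').drop (x.drop q).length with
          | nil =>
            have : (pvPat s').length - (x.drop q).length = 0 := by
              rw [← List.length_drop, hw]; rfl
            omega
          | cons a w' =>
            rw [hw, List.cons_append, List.cons_prefix_cons] at h3
            rw [List.head?_cons, h3.1]
        rcases pvF4 s' hs' (x.drop q).length hdlt hd1 hw0 with hd2 | ⟨hdL, hlast⟩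
        · have hw2 : (pvPat s').drop (x.drop q).length = '/' :: s' := by
            rw [hd2]; rfl
          rw [hw2, List.cons_append, List.cons_prefix_cons] at h3
          rcases pvSplit3 h3.2 with h4 | ⟨h5, _⟩
          · exact hne (pvF1 s' hs' s hsP h4)
          · exact hne (pvF1 s hsP s' hs' h5).symm
        · apply hnosite
          refine ⟨hlast, x.take q, ?_⟩
          have h2' : x.drop q = (pvPat s').take (x.drop q).length := by
            rw [List.prefix_iff_eq_take] at h2
            exact h2
          have h3' : (pvPat s').dropLast = x.drop q := by
            rw [List.dropLast_eq_take, ← hdL, ← h2']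
          rw [h3', List.take_append_drop]
      · have heq : pvPat s' <+: x.drop q := by
          rw [List.IsPrefix.eq_of_length_le h2 hdge]
        exact hin q s' hs' heq
  · have he : q - x.length < ('/' :: s).length := by omega
    have hdl : ((x ++ ('/' :: s)) ++ u).drop q = ('/' :: s).drop (q - x.length) ++ u := by
      rw [List.append_assoc, List.drop_append, List.drop_eq_nil_of_le hqx, List.nil_append,
        List.drop_append_of_le_length (le_of_lt he)]
    rw [hdl] at hp
    rcases pvSplit3 hp with h1 | ⟨h2, _⟩
    · exact (pvF5 s hsP s' hs' _ he).1 h1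
    · exact (pvF5 s hsP s' hs' _ he).2 h2

-- ---------- the block decomposition of the chain ----------

theorem pvFold_pre (ts : List (List Char)) (pre : List Char)
    (hcond : ∀ s' ∈ ts, ∀ (u : List Char), ∀ q < pre.length,
      ¬ pvPat s' <+: (pre ++ u).drop q) :
    ∀ (u : List Char), ts.foldl pvF (pre ++ u) = pre ++ ts.foldl pvF u := by
  induction ts with
  | nil => intro u; rfl
  | cons a ts ih =>
    intro u
    rw [List.foldl_cons, List.foldl_cons]
    have hstep : pvF (pre ++ u) a = pre ++ pvF u a := by
      unfold pvF
      exact pvRep_append _ _ pre u (fun q hq => hcond a List.mem_cons_self u q hq)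
    rw [hstep]
    exact ih (fun s' hs' => hcond s' (List.mem_cons_of_mem _ hs')) _

theorem pvHin_prefix {x x0 w : List Char} (hx : x0 ++ w = x)
    (hin : ∀ q, ∀ s'' ∈ pvSuffixes, ¬ pvPat s'' <+: x.drop q) :
    ∀ q, ∀ s'' ∈ pvSuffixes, ¬ pvPat s'' <+: x0.drop q := by
  intro q s'' hs'' hp
  rcases Nat.lt_or_ge x0.length q with hq | hq
  · rw [List.drop_eq_nil_of_le (by omega)] at hp
    have := hp.length_le
    simp [pvPat] at this
  · apply hin q s'' hs''
    rw [← hx, List.drop_append_of_le_length hq]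
    exact hp.trans (List.prefix_append _ _)

theorem pvChain_block (x s rest : List Char) (hs : s ∈ pvSuffixes)
    (hin : ∀ q, ∀ s'' ∈ pvSuffixes, ¬ pvPat s'' <+: x.drop q)
    (hns : ∀ s', (s, s') ∈ pvPairsAfter pvSuffixes →
      ¬ ((pvPat s').getLast? = some '/' ∧ (pvPat s').dropLast <:+ x)) :
    pvChain (x ++ (pvPat s ++ rest)) = x ++ ('/' :: s) ++ pvChain rest := by
  obtain ⟨t₁, t₂, hsplit⟩ := List.append_of_mem hs
  have hnd := pvNodup
  rw [hsplit, List.nodup_append] at hnd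
  have hne1 : ∀ a ∈ t₁, a ≠ s := fun a ha =>
    hnd.2.2 a ha s List.mem_cons_self
  have hne2 : ∀ a ∈ t₂, a ≠ s := fun a ha heq =>
    (List.nodup_cons.mp hnd.2.1).1 (heq ▸ ha)
  have hmem1 : ∀ a ∈ t₁, a ∈ pvSuffixes := fun a ha => by
    rw [hsplit]; exact List.mem_append_left _ ha
  have hmem2 : ∀ a ∈ t₂, a ∈ pvSuffixes := fun a ha => by
    rw [hsplit]; exact List.mem_append_right _ (List.mem_cons_of_mem _ ha)
  have hphase1 : ∀ (u : List Char),
      t₁.foldl pvF ((x ++ pvPat s) ++ u) = (x ++ pvPat s) ++ t₁.foldl pvF u :=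
    pvFold_pre t₁ (x ++ pvPat s) (fun s' hs' u q hq =>
      pvKA x s s' hs (hmem1 s' hs') (hne1 s' hs') hin u q
        (by simpa [List.length_append] using hq))
  have hphase3 : ∀ (u : List Char),
      t₂.foldl pvF ((x ++ ('/' :: s)) ++ u) = (x ++ ('/' :: s)) ++ t₂.foldl pvF u :=
    pvFold_pre t₂ (x ++ ('/' :: s)) (fun s' hs' u q hq =>
      pvKC x s s' hs (hmem2 s' hs') (hne2 s' hs')
        (hns s' (pvAfter_mem t₁ pvSuffixes t₂ s s' hsplit hs')) hin u q
        (by simpa [List.length_append] using hq))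
  have hstep : ∀ (u : List Char), pvF ((x ++ pvPat s) ++ u) s
      = (x ++ ('/' :: s)) ++ pvF u s := by
    intro u
    unfold pvF
    rw [List.append_assoc]
    rw [pvRep_append (pvPat s) ('/' :: s) x (pvPat s ++ u)
        (fun q hq => pvNMB x s u hs hin q hq s hs)]
    rw [pvRep_head _ _ _ (by simp [pvPat])]
    rw [← List.append_assoc]
  unfold pvChain
  rw [hsplit, List.foldl_append, List.foldl_append, List.foldl_cons, List.foldl_cons]
  have e1 : x ++ (pvPat s ++ rest) = (x ++ pvPat s) ++ rest := (List.append_assoc x _ _).symm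
  rw [e1, hphase1 rest, hstep _, hphase3 _]

theorem pvChain_id (l : List Char)
    (h : ∀ s' ∈ pvSuffixes, ∀ q, ¬ pvPat s' <+: l.drop q) :
    pvChain l = l := by
  have key : ∀ (ts : List (List Char)), (∀ a ∈ ts, a ∈ pvSuffixes) →
      ts.foldl pvF l = l := by
    intro ts
    induction ts with
    | nil => intro _; rfl
    | cons a ts ih =>
      intro hts
      rw [List.foldl_cons]
      have hstep : pvF l a = l := by
        unfold pvF
        have := pvRep_append (pvPat a) ('/' :: a) l [] (by
          intro q hq
          rw [List.append_nil]
          exact h a (hts a List.mem_cons_self) q)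
        rw [List.append_nil] at this
        rw [this, pvRep_nil, List.append_nil]
      rw [hstep]
      exact ih (fun b hb => hts b (List.mem_cons_of_mem _ hb))
  exact key pvSuffixes (fun _ h => h)

-- ---------- facts and helpers for the cascade (tightness) analysis ----------

theorem pvG1 : ∀ s' ∈ pvSuffixes, (pvPat s').getLast? = some '/' →
    ∀ s ∈ pvSuffixes, ∀ o < (pvPat s).length,
      ¬ (pvPat s).drop o <+: (pvPat s').dropLast := by decide

theorem pvG2 : ∀ s' ∈ pvSuffixes, (pvPat s').getLast? = some '/' →
    ∀ s ∈ pvSuffixes, ∀ o < (pvPat s').dropLast.length, 1 ≤ o →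
      ¬ pvPat s <+: (pvPat s').dropLast.drop o := by decide

theorem pvF6inv : ∀ C ∈ pvCascadeSubsL, ∃ p ∈ pvPairsAfter pvSuffixes,
    (pvPat p.2).getLast? = some '/' ∧ C = (pvPat p.2).dropLast ++ pvPat p.1 := by decide

theorem pvPairs_mem {α : Type} : ∀ (l : List α) (a b : α),
    (a, b) ∈ pvPairsAfter l → a ∈ l ∧ b ∈ l := by
  intro l
  induction l with
  | nil => intro a b h; cases h
  | cons c r ih =>
    intro a b h
    simp only [pvPairsAfter, List.mem_append, List.mem_map] at h
    rcases h with ⟨y, hy, heq⟩ | h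
    · injection heq with h1 h2
      subst h1
      subst h2
      exact ⟨List.mem_cons_self, List.mem_cons_of_mem _ hy⟩
    · obtain ⟨h1, h2⟩ := ih a b h
      exact ⟨List.mem_cons_of_mem _ h1, List.mem_cons_of_mem _ h2⟩

theorem pvAfterMemSplit {α : Type} : ∀ (t₁ : List α) (l t₂ : List α) (a b : α),
    l = t₁ ++ a :: t₂ → l.Nodup → (a, b) ∈ pvPairsAfter l → b ∈ t₂ := by
  intro t₁
  induction t₁ with
  | nil =>
    intro l t₂ a b hl hnd h
    subst hl
    simp only [List.nil_append, pvPairsAfter, List.mem_append, List.mem_map] at h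
    rcases h with ⟨y, hy, heq⟩ | h
    · injection heq with h1 h2
      subst h2
      exact hy
    · exact absurd (pvPairs_mem t₂ a b h).1 (List.nodup_cons.mp hnd).1
  | cons c t₁ ih =>
    intro l t₂ a b hl hnd h
    subst hl
    simp only [List.cons_append, pvPairsAfter, List.mem_append, List.mem_map] at h
    rcases h with ⟨y, hy, heq⟩ | h
    · injection heq with h1 h2
      subst h1
      subst h2
      exact absurd (List.mem_append_right _ List.mem_cons_self) (List.nodup_cons.mp hnd).1
    · exact ih _ t₂ a b rfl (List.nodup_cons.mp hnd).2 h

theorem pvConcatLast {l : List Char} {c : Char} (h : l.getLast? = some c) :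
    l.dropLast ++ [c] = l := by
  induction l using List.reverseRecOn with
  | nil => cases h
  | append_singleton ys y _ =>
    simp only [List.getLast?_concat] at h
    obtain rfl : y = c := by injection h
    simp

theorem pvDLhead (a : List Char) : ((pvPat a).dropLast).head? = some '.' := by
  simp [pvPat, List.dropLast_cons₂]

theorem pvDLlen (a : List Char) : 1 ≤ (pvPat a).dropLast.length := by
  simp [pvPat, List.dropLast_cons₂]

-- processing the tail passes when x still ends with a pending cascade trigger:
-- some pass rewrites strictly inside x, so the output forks from x before x ends
theorem pvFold_site : ∀ (T : List (List Char)) (x s u : List Char),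
    (∀ a ∈ T, a ∈ pvSuffixes) → T.Nodup → (∀ a ∈ T, a ≠ s) → s ∈ pvSuffixes →
    (∀ q, ∀ s'' ∈ pvSuffixes, ¬ pvPat s'' <+: x.drop q) →
    (∃ s' ∈ T, (pvPat s').getLast? = some '/' ∧ (pvPat s').dropLast <:+ x) →
    ∃ (p : ℕ) (tl : List Char), p < x.length ∧
      T.foldl pvF ((x ++ ('/' :: s)) ++ u) = x.take p ++ '/' :: tl ∧
      (x.drop p).head? = some '.' := by
  intro T
  induction T with
  | nil =>
    intro x s u _ _ _ _ _ hsite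
    simp at hsite
  | cons a T ih =>
    intro x s u hTP hTnd hTne hsP hin hsite
    have haP : a ∈ pvSuffixes := hTP a List.mem_cons_self
    have hTP' : ∀ b ∈ T, b ∈ pvSuffixes := fun b hb => hTP b (List.mem_cons_of_mem _ hb)
    have hTnd' : T.Nodup := (List.nodup_cons.mp hTnd).2
    by_cases ha : (pvPat a).getLast? = some '/' ∧ (pvPat a).dropLast <:+ x
    · -- this pass fires on the pending trigger at the end of x
      have hlast := ha.1
      obtain ⟨t0, ht0⟩ := ha.2
      have hlen0 : t0.length < x.length := by
        have h1 := pvDLlen a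
        have : t0.length + (pvPat a).dropLast.length = x.length := by
          rw [← ht0, List.length_append]
        omega
      have hin0 : ∀ q, ∀ s'' ∈ pvSuffixes, ¬ pvPat s'' <+: t0.drop q :=
        pvHin_prefix ht0 hin
      have hx : (x ++ ('/' :: s)) ++ u = t0 ++ (pvPat a ++ (s ++ u)) := by
        rw [← ht0, ← pvConcatLast hlast]
        simp
      have hstep : pvF (t0 ++ (pvPat a ++ (s ++ u))) a
          = (t0 ++ ('/' :: a)) ++ pvRep (pvPat a) ('/' :: a) (s ++ u) := by
        unfold pvF
        rw [pvRep_append (pvPat a) ('/' :: a) t0 (pvPat a ++ (s ++ u))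
          (fun q hq => pvNMB t0 a (s ++ u) haP hin0 q hq a haP)]
        rw [pvRep_head _ _ _ (by simp [pvPat])]
        rw [← List.append_assoc]
      by_cases hsite' : ∃ s' ∈ T, (pvPat s').getLast? = some '/' ∧ (pvPat s').dropLast <:+ t0
      · obtain ⟨p, tl, hp, hout, hchar⟩ :=
          ih t0 a (pvRep (pvPat a) ('/' :: a) (s ++ u)) hTP' hTnd'
            (fun b hb heq => (List.nodup_cons.mp hTnd).1 (heq ▸ hb)) haP hin0 hsite'
        refine ⟨p, tl, by omega, ?_, ?_⟩
        · rw [List.foldl_cons, hx, hstep, hout]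
          congr 1
          rw [← ht0, List.take_append_of_le_length (by omega)]
        · obtain ⟨z, hz⟩ : ∃ z, t0.drop p = '.' :: z := by
            cases hzz : t0.drop p with
            | nil => rw [hzz] at hchar; cases hchar
            | cons c z =>
              rw [hzz, List.head?_cons] at hchar
              obtain rfl : c = '.' := by injection hchar
              exact ⟨z, rfl⟩
          rw [← ht0, List.drop_append_of_le_length (by omega), hz]
          rfl
      · have hout := pvFold_pre T (t0 ++ ('/' :: a)) (fun s' hs' u' q hq =>
          pvKC t0 a s' haP (hTP' s' hs')
            (fun heq => (List.nodup_cons.mp hTnd).1 (heq ▸ hs'))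
            (fun hcond => hsite' ⟨s', hs', hcond⟩) hin0 u' q
            (by simpa [List.length_append] using hq))
        refine ⟨t0.length, a ++ T.foldl pvF (pvRep (pvPat a) ('/' :: a) (s ++ u)), hlen0, ?_, ?_⟩
        · rw [List.foldl_cons, hx, hstep, hout]
          rw [← ht0, List.take_append_of_le_length le_rfl, List.take_length]
          simp
        · rw [← ht0, List.drop_append_of_le_length le_rfl, List.drop_length, List.nil_append]
          exact pvDLhead a
    · -- this pass leaves x ++ '/'::s alone and only acts on u
      have hstep : pvF ((x ++ ('/' :: s)) ++ u) a = (x ++ ('/' :: s)) ++ pvF u a := by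
        unfold pvF
        exact pvRep_append _ _ (x ++ ('/' :: s)) u (fun q hq =>
          pvKC x s a hsP haP (hTne a List.mem_cons_self) ha hin u q
            (by simpa [List.length_append] using hq))
      obtain ⟨s', hs', hcond⟩ := hsite
      have hs'T : s' ∈ T := by
        rcases List.mem_cons.mp hs' with rfl | h
        · exact absurd hcond ha
        · exact h
      rw [List.foldl_cons, hstep]
      exact ih x s (pvF u a) hTP' hTnd' (fun b hb => hTne b (List.mem_cons_of_mem _ hb))
        hsP hin ⟨s', hs'T, hcond⟩

-- the chain when the first match's left context ends with a pending cascade trigger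
theorem pvChain_block_site (x s rest : List Char) (hs : s ∈ pvSuffixes)
    (hin : ∀ q, ∀ s'' ∈ pvSuffixes, ¬ pvPat s'' <+: x.drop q)
    (hsite : ∃ s', (s, s') ∈ pvPairsAfter pvSuffixes ∧
      (pvPat s').getLast? = some '/' ∧ (pvPat s').dropLast <:+ x) :
    ∃ (p : ℕ) (tl : List Char), p < x.length ∧
      pvChain (x ++ (pvPat s ++ rest)) = x.take p ++ '/' :: tl ∧
      (x.drop p).head? = some '.' := by
  obtain ⟨t₁, t₂, hsplit⟩ := List.append_of_mem hs
  have hnd := pvNodup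
  have hndsp := pvNodup
  rw [hsplit, List.nodup_append] at hnd
  have hne1 : ∀ a ∈ t₁, a ≠ s := fun a ha =>
    hnd.2.2 a ha s List.mem_cons_self
  have hne2 : ∀ a ∈ t₂, a ≠ s := fun a ha heq =>
    (List.nodup_cons.mp hnd.2.1).1 (heq ▸ ha)
  have hmem1 : ∀ a ∈ t₁, a ∈ pvSuffixes := fun a ha => by
    rw [hsplit]; exact List.mem_append_left _ ha
  have hmem2 : ∀ a ∈ t₂, a ∈ pvSuffixes := fun a ha => by
    rw [hsplit]; exact List.mem_append_right _ (List.mem_cons_of_mem _ ha)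
  have hphase1 : ∀ (u : List Char),
      t₁.foldl pvF ((x ++ pvPat s) ++ u) = (x ++ pvPat s) ++ t₁.foldl pvF u :=
    pvFold_pre t₁ (x ++ pvPat s) (fun s' hs' u q hq =>
      pvKA x s s' hs (hmem1 s' hs') (hne1 s' hs') hin u q
        (by simpa [List.length_append] using hq))
  have hstep : ∀ (u : List Char), pvF ((x ++ pvPat s) ++ u) s
      = (x ++ ('/' :: s)) ++ pvF u s := by
    intro u
    unfold pvF
    rw [List.append_assoc]
    rw [pvRep_append (pvPat s) ('/' :: s) x (pvPat s ++ u)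
        (fun q hq => pvNMB x s u hs hin q hq s hs)]
    rw [pvRep_head _ _ _ (by simp [pvPat])]
    rw [← List.append_assoc]
  obtain ⟨s', hpair, hlast, hsfx⟩ := hsite
  have hs't₂ : s' ∈ t₂ := pvAfterMemSplit t₁ pvSuffixes t₂ s s' hsplit hndsp hpair
  have ht₂nd : t₂.Nodup := (List.nodup_cons.mp hnd.2.1).2
  obtain ⟨p, tl, hp, hout, hchar⟩ := pvFold_site t₂ x s (pvF (t₁.foldl pvF rest) s)
    hmem2 ht₂nd hne2 hs hin ⟨s', hs't₂, hlast, hsfx⟩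
  refine ⟨p, tl, hp, ?_, hchar⟩
  unfold pvChain
  rw [hsplit, List.foldl_append, List.foldl_cons]
  have e1 : x ++ (pvPat s ++ rest) = (x ++ pvPat s) ++ rest := (List.append_assoc x _ _).symm
  rw [e1, hphase1 rest, hstep _, hout]

-- any cascade substring, when the first pattern match carries no pending trigger,
-- lies wholly inside the part after that match
theorem pvLocalize (x s rest : List Char) (hsP : s ∈ pvSuffixes)
    (hin : ∀ q, ∀ s'' ∈ pvSuffixes, ¬ pvPat s'' <+: x.drop q)
    (hns : ¬ ∃ s', (s, s') ∈ pvPairsAfter pvSuffixes ∧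
      (pvPat s').getLast? = some '/' ∧ (pvPat s').dropLast <:+ x)
    (C : List Char) (hC : C ∈ pvCascadeSubsL)
    (hocc : C <:+: x ++ (pvPat s ++ rest)) : C <:+: rest := by
  obtain ⟨⟨si, sj⟩, hpmem, hdir, hCeq⟩ := pvF6inv C hC
  obtain ⟨hsiP, hsjP⟩ := pvPairs_mem pvSuffixes si sj hpmem
  obtain ⟨pre, suf, hsplit⟩ := hocc
  set l := x ++ (pvPat s ++ rest) with hl
  have hdq : l.drop pre.length = C ++ suf := by
    rw [← hsplit, List.append_assoc, List.drop_append_of_le_length le_rfl,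
      List.drop_length, List.nil_append]
  have hCpre : C <+: l.drop pre.length := by rw [hdq]; exact ⟨suf, rfl⟩
  have hdLC : (pvPat sj).dropLast <+: C := ⟨pvPat si, hCeq.symm⟩
  have hipre : pvPat si <+: l.drop (pre.length + (pvPat sj).dropLast.length) := by
    have h1 : (l.drop pre.length).drop (pvPat sj).dropLast.length = pvPat si ++ suf := by
      rw [hdq, hCeq, List.append_assoc, List.drop_append_of_le_length le_rfl,
        List.drop_length, List.nil_append]
    rw [List.drop_drop] at h1
    rw [h1]
    exact ⟨suf, rfl⟩
  have hP3 : 3 ≤ (pvPat s).length := by simp [pvPat]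
  have hdL1 : 1 ≤ (pvPat sj).dropLast.length := pvDLlen sj
  have hnomatch : ∀ q' < x.length, ∀ s'' ∈ pvSuffixes, ¬ pvPat s'' <+: l.drop q' := by
    intro q' hq' s'' hs'' hp
    rw [hl] at hp
    exact pvNMB x s rest hsP hin q' hq' s'' hs'' hp
  have hq'ge : x.length ≤ pre.length + (pvPat sj).dropLast.length := by
    by_contra hcon
    exact hnomatch _ (by omega) si hsiP hipre
  have hq'notin : ¬ (x.length < pre.length + (pvPat sj).dropLast.length ∧
      pre.length + (pvPat sj).dropLast.length < x.length + (pvPat s).length) := by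
    rintro ⟨h1, h2⟩
    have he : pre.length + (pvPat sj).dropLast.length - x.length < (pvPat s).length := by omega
    have hdl2 : l.drop (pre.length + (pvPat sj).dropLast.length) =
        (pvPat s).drop (pre.length + (pvPat sj).dropLast.length - x.length) ++ rest := by
      rw [hl, List.drop_append, List.drop_eq_nil_of_le (by omega), List.nil_append,
        List.drop_append_of_le_length (le_of_lt he)]
    rw [hdl2] at hipre
    rcases pvSplit3 hipre with h3 | ⟨h4, _⟩
    · by_cases hss : si = s
      · rw [hss] at h3
        have := h3.length_le
        rw [List.length_drop] at this
        omega
      · exact pvF2a s hsP si hsiP hss _ he h3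
    · exact pvF2b s hsP si hsiP _ he (Or.inl (by omega)) h4
  rcases Nat.lt_or_ge (pre.length + (pvPat sj).dropLast.length)
      (x.length + (pvPat s).length) with hlt | hge
  · -- the pattern inside C sits exactly at the first match: a pending trigger
    exfalso
    have hq'eq : pre.length + (pvPat sj).dropLast.length = x.length := by
      rcases Nat.eq_or_lt_of_le hq'ge with h | h
      · omega
      · exact absurd ⟨h, hlt⟩ hq'notin
    have hsis : si = s := by
      have h1 : pvPat si <+: l.drop x.length := by rw [← hq'eq]; exact hipre
      have h2 : pvPat s <+: l.drop x.length := by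
        rw [hl, List.drop_append_of_le_length le_rfl, List.drop_length, List.nil_append]
        exact List.prefix_append _ _
      rcases List.prefix_or_prefix_of_prefix h1 h2 with h3 | h3
      · have := pvPrefixDrop 3 (by simp [pvPat]) h3
        simp only [pvPat, List.drop_succ_cons, List.drop_zero] at this
        exact pvF1 si hsiP s hsP this
      · have := pvPrefixDrop 3 (by simp [pvPat]) h3
        simp only [pvPat, List.drop_succ_cons, List.drop_zero] at this
        exact (pvF1 s hsP si hsiP this).symm
    apply hns
    refine ⟨sj, hsis ▸ hpmem, hdir, x.take pre.length, ?_⟩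
    have hdLx : (pvPat sj).dropLast <+: x.drop pre.length := by
      have h1 : (pvPat sj).dropLast <+: l.drop pre.length :=
        List.IsPrefix.trans hdLC hCpre
      have h2 : (l.drop pre.length).take (pvPat sj).dropLast.length
          = (x.drop pre.length).take (pvPat sj).dropLast.length := by
        rw [hl, List.drop_append_of_le_length (by omega), List.take_append_of_le_length]
        rw [List.length_drop]
        omega
      rw [List.prefix_iff_eq_take] at h1 ⊢
      rw [h1, h2]
      congr 1
      rw [List.length_take, List.length_drop]
      omega
    have : x.drop pre.length = (pvPat sj).dropLast := by
      refine (List.IsPrefix.eq_of_length_le hdLx ?_).symm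
      rw [List.length_drop]
      omega
    rw [← this, List.take_append_drop]
  · rcases Nat.lt_or_ge pre.length x.length with hqm | hqm
    · -- the trigger part would cover the whole pattern block: impossible
      exfalso
      have hdLpre : (pvPat sj).dropLast <+: x.drop pre.length ++ (pvPat s ++ rest) := by
        have h1 : (pvPat sj).dropLast <+: l.drop pre.length :=
          List.IsPrefix.trans hdLC hCpre
        rw [hl, List.drop_append_of_le_length (le_of_lt hqm)] at h1
        exact h1
      rcases pvSplit3 hdLpre with h1 | ⟨h2, h3⟩
      · have := h1.length_le
        rw [List.length_drop] at this
        omega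
      · rcases pvSplit3 h3 with h4 | ⟨h5, _⟩
        · have h6 : pvPat s <+: (pvPat sj).dropLast.drop (x.drop pre.length).length := by
            have he2 : (pvPat sj).dropLast.drop (x.drop pre.length).length = pvPat s :=
              List.IsPrefix.eq_of_length_le h4 (by
                rw [List.length_drop, List.length_drop]; omega)
            rw [he2]
          exact pvG2 sj hsjP hdir s hsP _ (by rw [List.length_drop]; omega)
            (by rw [List.length_drop]; omega) h6
        · exact pvG2 sj hsjP hdir s hsP _ (by rw [List.length_drop]; omega)
            (by rw [List.length_drop]; omega) h5
    · rcases Nat.lt_or_ge pre.length (x.length + (pvPat s).length) with hqP | hqP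
      · -- the trigger part would start inside the pattern block: impossible
        exfalso
        have he : pre.length - x.length < (pvPat s).length := by omega
        have hdLpre : (pvPat sj).dropLast <+: (pvPat s).drop (pre.length - x.length) ++ rest := by
          have h1 : (pvPat sj).dropLast <+: l.drop pre.length :=
            List.IsPrefix.trans hdLC hCpre
          rw [hl, List.drop_append, List.drop_eq_nil_of_le (by omega), List.nil_append,
            List.drop_append_of_le_length (le_of_lt he)] at h1
          exact h1
        rcases pvSplit3 hdLpre with h1 | ⟨h2, _⟩
        · have h6 : (pvPat s).drop (pre.length - x.length) <+: (pvPat sj).dropLast := by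
            rw [List.IsPrefix.eq_of_length_le h1 (by rw [List.length_drop]; omega)]
          exact pvG1 sj hsjP hdir s hsP _ he h6
        · exact pvG1 sj hsjP hdir s hsP _ he h2
      · -- C lies wholly inside rest
        have hdd : l.drop pre.length = rest.drop (pre.length - x.length - (pvPat s).length) := by
          rw [hl, List.drop_append, List.drop_eq_nil_of_le (by omega), List.nil_append,
            List.drop_append, List.drop_eq_nil_of_le (by omega), List.nil_append]
        rw [hdd] at hCpre
        exact pvPrefixOfDropInfix _ hCpre

-- ---------- main equivalence outside the cascade set ----------

theorem pvMatchAt_ne_none {w : List Char} {s'' : List Char} (hs'' : s'' ∈ pvSuffixes)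
    (hp : pvPat s'' <+: w) : pvMatchAt w ≠ none := fun hnone =>
  pvMatchAt_none_imp hnone s'' hs'' hp

theorem pvFirstDecomp (l : List Char)
    (hex : ∃ q, pvMatchAt (l.drop q) ≠ none) :
    ∃ (m : ℕ) (s rest : List Char), s ∈ pvSuffixes ∧ m < l.length ∧
      l = l.take m ++ (pvPat s ++ rest) ∧ (l.take m).length = m ∧
      rest = l.drop (m + (pvPat s).length) ∧
      (∀ q < m, pvMatchAt (l.drop q) = none) := by
  have hm : pvMatchAt (l.drop (Nat.find hex)) ≠ none := Nat.find_spec hex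
  set m := Nat.find hex with hmdef
  have hmin : ∀ q < m, pvMatchAt (l.drop q) = none := by
    intro q hq
    have := Nat.find_min hex hq
    simpa using this
  obtain ⟨s, hms⟩ := Option.ne_none_iff_exists'.mp hm
  obtain ⟨hsP, hpre⟩ := pvMatchAt_some hms
  have hml : m < l.length := by
    by_contra hcon
    rw [List.drop_eq_nil_of_le (by omega)] at hms
    rw [pvMatchAt_nil] at hms
    cases hms
  refine ⟨m, s, l.drop (m + (pvPat s).length), hsP, hml, ?_, ?_, rfl, hmin⟩
  · have hdm : l.drop m = pvPat s ++ l.drop (m + (pvPat s).length) := by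
      have hr := pvPrefixRecompose hpre
      rw [List.drop_drop] at hr
      exact hr.symm
    rw [← hdm, List.take_append_drop]
  · rw [List.length_take]; omega

theorem pvHin_of_first (l : List Char) (m : ℕ)
    (hmin : ∀ q < m, pvMatchAt (l.drop q) = none) :
    ∀ q, ∀ s'' ∈ pvSuffixes, ¬ pvPat s'' <+: (l.take m).drop q := by
  intro q s'' hs'' hp
  rcases Nat.lt_or_ge q m with hq | hq
  · have h1 : (l.take m).drop q <+: l.drop q := by
      rw [List.drop_take]
      exact List.take_prefix _ _
    exact pvMatchAt_ne_none hs'' (hp.trans h1) (hmin q hq)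
  · rw [List.drop_eq_nil_of_le (by rw [List.length_take]; omega)] at hp
    have := hp.length_le
    simp [pvPat] at this

theorem pvNS_of_noCascade (l : List Char) (m : ℕ) (s rest : List Char)
    (hl2 : l = l.take m ++ (pvPat s ++ rest))
    (hnc : ∀ sub ∈ pvCascadeSubsL, ¬ sub <:+: l) :
    ∀ s', (s, s') ∈ pvPairsAfter pvSuffixes →
      ¬ ((pvPat s').getLast? = some '/' ∧ (pvPat s').dropLast <:+ l.take m) := by
  rintro s' hpair ⟨hlast, t0, ht0⟩
  apply hnc ((pvPat s').dropLast ++ pvPat s) (pvF6 (s, s') hpair hlast)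
  refine ⟨t0, rest, ?_⟩
  rw [hl2, ← ht0]
  simp [List.append_assoc]

theorem pvChain_eq_scan_bounded : ∀ (N : ℕ) (l : List Char), l.length ≤ N →
    (∀ sub ∈ pvCascadeSubsL, ¬ sub <:+: l) → pvChain l = pvScan l := by
  intro N
  induction N with
  | zero =>
    intro l hl _
    have hnil : l = [] := by cases l <;> simp_all
    subst hnil
    rw [pvChain_id [] (fun s' _ q hp => by
      have : pvPat s' <+: [] := by simpa using hp
      have := this.length_le
      simp [pvPat] at this)]
    rfl
  | succ N ih =>
    intro l hl hnc
    by_cases hex : ∃ q, pvMatchAt (l.drop q) ≠ none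
    · obtain ⟨m, s, rest, hsP, hml, hl2, hxlen, hrest, hmin⟩ := pvFirstDecomp l hex
      have hin := pvHin_of_first l m hmin
      have hns := pvNS_of_noCascade l m s rest hl2 hnc
      have hrest_len : rest.length ≤ N := by
        have hplen : 3 ≤ (pvPat s).length := by simp [pvPat]
        rw [hrest]
        simp only [List.length_drop]
        omega
      have hnc_rest : ∀ sub ∈ pvCascadeSubsL, ¬ sub <:+: rest := by
        rw [hrest]
        exact fun sub hsub hinf => hnc sub hsub (hinf.trans (List.drop_suffix _ _).isInfix)
      conv_lhs => rw [hl2]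
      conv_rhs => rw [hl2]
      rw [pvChain_block (l.take m) s rest hsP hin hns]
      rw [pvScan_prefix_none (l.take m) _ (by
        intro q hq
        rw [← hl2]
        exact hmin q (by omega))]
      rw [pvScan_block s hsP _]
      rw [ih _ hrest_len hnc_rest]
      rw [List.append_assoc]
    · push Not at hex
      have hall : ∀ q, pvMatchAt (l.drop q) = none := fun q => by
        have := hex q
        simpa using this
      rw [pvChain_id l (fun s' hs' q hp => pvMatchAt_none_imp (hall q) s' hs' hp),
        pvScan_id l hall]

theorem pvChain_eq_scan (l : List Char)
    (hnc : ∀ sub ∈ pvCascadeSubsL, ¬ sub <:+: l) :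
    pvChain l = pvScan l :=
  pvChain_eq_scan_bounded l.length l le_rfl hnc

-- ---------- strict difference everywhere inside the cascade set ----------

theorem pvCascade_nonempty : ∀ C ∈ pvCascadeSubsL, C ≠ [] := by decide

theorem pvTight_bounded : ∀ (N : ℕ) (l : List Char), l.length ≤ N →
    (∃ C ∈ pvCascadeSubsL, C <:+: l) → pvChain l ≠ pvScan l := by
  intro N
  induction N with
  | zero =>
    intro l hl hD
    obtain ⟨C, hC, hocc⟩ := hD
    have hnil : l = [] := by cases l <;> simp_all
    subst hnil
    have := hocc.length_le
    have hne := pvCascade_nonempty C hC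
    cases C with
    | nil => exact absurd rfl hne
    | cons c cs => simp at this
  | succ N ih =>
    intro l hl hD
    obtain ⟨C, hC, hocc⟩ := hD
    obtain ⟨⟨si, sj⟩, hpmem, hdir, hCeq⟩ := pvF6inv C hC
    obtain ⟨hsiP, _⟩ := pvPairs_mem pvSuffixes si sj hpmem
    have hex : ∃ q, pvMatchAt (l.drop q) ≠ none := by
      obtain ⟨pre, suf, hsplit⟩ := hocc
      refine ⟨pre.length + (pvPat sj).dropLast.length, ?_⟩
      apply pvMatchAt_ne_none hsiP
      have h1 : l.drop pre.length = C ++ suf := by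
        rw [← hsplit, List.append_assoc, List.drop_append_of_le_length le_rfl,
          List.drop_length, List.nil_append]
      have h2 : (l.drop pre.length).drop (pvPat sj).dropLast.length = pvPat si ++ suf := by
        rw [h1, hCeq, List.append_assoc, List.drop_append_of_le_length le_rfl,
          List.drop_length, List.nil_append]
      rw [List.drop_drop] at h2
      rw [h2]
      exact ⟨suf, rfl⟩
    obtain ⟨m, s, rest, hsP, hml, hl2, hxlen, hrest, hmin⟩ := pvFirstDecomp l hex
    have hin := pvHin_of_first l m hmin
    have hscan : pvScan l = l.take m ++ ('/' :: s) ++ pvScan rest := by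
      conv_lhs => rw [hl2]
      rw [pvScan_prefix_none (l.take m) _ (by
        intro q hq
        rw [← hl2]
        exact hmin q (by omega))]
      rw [pvScan_block s hsP _]
      rw [List.append_assoc]
    by_cases hsite : ∃ s', (s, s') ∈ pvPairsAfter pvSuffixes ∧
        (pvPat s').getLast? = some '/' ∧ (pvPat s').dropLast <:+ l.take m
    · obtain ⟨p, tl, hp, hout, hchar⟩ := pvChain_block_site (l.take m) s rest hsP hin hsite
      intro heq
      have hchain : pvChain l = (l.take m).take p ++ '/' :: tl := by
        conv_lhs => rw [hl2]
        exact hout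
      rw [hchain, hscan] at heq
      have h1 : ((l.take m).take p ++ '/' :: tl)[p]? = some '/' := by
        rw [List.getElem?_append_right (by rw [List.length_take]; omega)]
        have : p - ((l.take m).take p).length = 0 := by rw [List.length_take]; omega
        rw [this]
        rfl
      have h2 : (l.take m ++ ('/' :: s) ++ pvScan rest)[p]? = some '.' := by
        rw [List.append_assoc, List.getElem?_append_left (by omega)]
        rw [← List.head?_drop]
        exact hchar
      rw [heq, h2] at h1
      injection h1 with h1
      exact absurd h1 (by decide)
    · have hns : ∀ s', (s, s') ∈ pvPairsAfter pvSuffixes →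
          ¬ ((pvPat s').getLast? = some '/' ∧ (pvPat s').dropLast <:+ l.take m) :=
        fun s' hpair hcond => hsite ⟨s', hpair, hcond⟩
      have hloc : C <:+: rest := by
        apply pvLocalize (l.take m) s rest hsP hin (fun ⟨s', h1, h2, h3⟩ => hsite ⟨s', h1, h2, h3⟩)
          C hC
        rw [← hl2]
        exact hocc
      have hrest_len : rest.length ≤ N := by
        have hplen : 3 ≤ (pvPat s).length := by simp [pvPat]
        rw [hrest]
        simp only [List.length_drop]
        omega
      have hchain : pvChain l = l.take m ++ ('/' :: s) ++ pvChain rest := by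
        conv_lhs => rw [hl2]
        rw [pvChain_block (l.take m) s rest hsP hin hns]
      intro heq
      rw [hchain, hscan] at heq
      rw [List.append_assoc, List.append_assoc] at heq
      have := List.append_cancel_left heq
      have := List.append_cancel_left this
      exact ih rest hrest_len ⟨C, hC, hloc⟩ this

theorem normalize_legacy_paths_spec : Claim_unchanged_normalize_legacy_paths := by
  intro html _ hnd
  have hnc : ∀ sub ∈ pvCascadeSubsL, ¬ sub <:+: html.toList := by
    intro sub hsub hinf
    apply hnd
    unfold D_normalize_legacy_paths
    simp only [pvCascadeSubsL, List.mem_cons, List.not_mem_nil, or_false] at hsub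
    rcases hsub with hsub|hsub|hsub|hsub|hsub|hsub|hsub|hsub|hsub|hsub|hsub|hsub|hsub|hsub|hsub|hsub|hsub|hsub|hsub|hsub|hsub|hsub
    · exact ⟨4, by omega, 0, by omega, by omega, by
        rw [PySem.Str.isIn_iff_infix, String.toList_ofList,
          show (pvOldAt 4).dropLast ++ pvOldAt 0 = sub from by rw [hsub]; decide]
        exact hinf⟩
    · exact ⟨4, by omega, 1, by omega, by omega, by
        rw [PySem.Str.isIn_iff_infix, String.toList_ofList,
          show (pvOldAt 4).dropLast ++ pvOldAt 1 = sub from by rw [hsub]; decide]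
        exact hinf⟩
    · exact ⟨4, by omega, 2, by omega, by omega, by
        rw [PySem.Str.isIn_iff_infix, String.toList_ofList,
          show (pvOldAt 4).dropLast ++ pvOldAt 2 = sub from by rw [hsub]; decide]
        exact hinf⟩
    · exact ⟨4, by omega, 3, by omega, by omega, by
        rw [PySem.Str.isIn_iff_infix, String.toList_ofList,
          show (pvOldAt 4).dropLast ++ pvOldAt 3 = sub from by rw [hsub]; decide]
        exact hinf⟩
    · exact ⟨5, by omega, 0, by omega, by omega, by
        rw [PySem.Str.isIn_iff_infix, String.toList_ofList,
          show (pvOldAt 5).dropLast ++ pvOldAt 0 = sub from by rw [hsub]; decide]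
        exact hinf⟩
    · exact ⟨5, by omega, 1, by omega, by omega, by
        rw [PySem.Str.isIn_iff_infix, String.toList_ofList,
          show (pvOldAt 5).dropLast ++ pvOldAt 1 = sub from by rw [hsub]; decide]
        exact hinf⟩
    · exact ⟨5, by omega, 2, by omega, by omega, by
        rw [PySem.Str.isIn_iff_infix, String.toList_ofList,
          show (pvOldAt 5).dropLast ++ pvOldAt 2 = sub from by rw [hsub]; decide]
        exact hinf⟩
    · exact ⟨5, by omega, 3, by omega, by omega, by
        rw [PySem.Str.isIn_iff_infix, String.toList_ofList,
          show (pvOldAt 5).dropLast ++ pvOldAt 3 = sub from by rw [hsub]; decide]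
        exact hinf⟩
    · exact ⟨5, by omega, 4, by omega, by omega, by
        rw [PySem.Str.isIn_iff_infix, String.toList_ofList,
          show (pvOldAt 5).dropLast ++ pvOldAt 4 = sub from by rw [hsub]; decide]
        exact hinf⟩
    · exact ⟨6, by omega, 0, by omega, by omega, by
        rw [PySem.Str.isIn_iff_infix, String.toList_ofList,
          show (pvOldAt 6).dropLast ++ pvOldAt 0 = sub from by rw [hsub]; decide]
        exact hinf⟩
    · exact ⟨6, by omega, 1, by omega, by omega, by
        rw [PySem.Str.isIn_iff_infix, String.toList_ofList,
          show (pvOldAt 6).dropLast ++ pvOldAt 1 = sub from by rw [hsub]; decide]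
        exact hinf⟩
    · exact ⟨6, by omega, 2, by omega, by omega, by
        rw [PySem.Str.isIn_iff_infix, String.toList_ofList,
          show (pvOldAt 6).dropLast ++ pvOldAt 2 = sub from by rw [hsub]; decide]
        exact hinf⟩
    · exact ⟨6, by omega, 3, by omega, by omega, by
        rw [PySem.Str.isIn_iff_infix, String.toList_ofList,
          show (pvOldAt 6).dropLast ++ pvOldAt 3 = sub from by rw [hsub]; decide]
        exact hinf⟩
    · exact ⟨6, by omega, 4, by omega, by omega, by
        rw [PySem.Str.isIn_iff_infix, String.toList_ofList,
          show (pvOldAt 6).dropLast ++ pvOldAt 4 = sub from by rw [hsub]; decide]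
        exact hinf⟩
    · exact ⟨6, by omega, 5, by omega, by omega, by
        rw [PySem.Str.isIn_iff_infix, String.toList_ofList,
          show (pvOldAt 6).dropLast ++ pvOldAt 5 = sub from by rw [hsub]; decide]
        exact hinf⟩
    · exact ⟨7, by omega, 0, by omega, by omega, by
        rw [PySem.Str.isIn_iff_infix, String.toList_ofList,
          show (pvOldAt 7).dropLast ++ pvOldAt 0 = sub from by rw [hsub]; decide]
        exact hinf⟩
    · exact ⟨7, by omega, 1, by omega, by omega, by
        rw [PySem.Str.isIn_iff_infix, String.toList_ofList,
          show (pvOldAt 7).dropLast ++ pvOldAt 1 = sub from by rw [hsub]; decide]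
        exact hinf⟩
    · exact ⟨7, by omega, 2, by omega, by omega, by
        rw [PySem.Str.isIn_iff_infix, String.toList_ofList,
          show (pvOldAt 7).dropLast ++ pvOldAt 2 = sub from by rw [hsub]; decide]
        exact hinf⟩
    · exact ⟨7, by omega, 3, by omega, by omega, by
        rw [PySem.Str.isIn_iff_infix, String.toList_ofList,
          show (pvOldAt 7).dropLast ++ pvOldAt 3 = sub from by rw [hsub]; decide]
        exact hinf⟩
    · exact ⟨7, by omega, 4, by omega, by omega, by
        rw [PySem.Str.isIn_iff_infix, String.toList_ofList,
          show (pvOldAt 7).dropLast ++ pvOldAt 4 = sub from by rw [hsub]; decide]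
        exact hinf⟩
    · exact ⟨7, by omega, 5, by omega, by omega, by
        rw [PySem.Str.isIn_iff_infix, String.toList_ofList,
          show (pvOldAt 7).dropLast ++ pvOldAt 5 = sub from by rw [hsub]; decide]
        exact hinf⟩
    · exact ⟨7, by omega, 6, by omega, by omega, by
        rw [PySem.Str.isIn_iff_infix, String.toList_ofList,
          show (pvOldAt 7).dropLast ++ pvOldAt 6 = sub from by rw [hsub]; decide]
        exact hinf⟩
  have hcs := pvChain_eq_scan html.toList hnc
  calc normalize_legacy_paths html
      = String.ofList (normalize_legacy_paths html).toList := String.ofList_toList.symm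
    _ = String.ofList (pvChain html.toList) := by rw [pvA_toList]
    _ = String.ofList (pvScan html.toList) := by rw [hcs]
    _ = normalize_legacy_paths_alt html := rfl

theorem normalize_legacy_paths_changed : Claim_changed_normalize_legacy_paths := by
  unfold Claim_changed_normalize_legacy_paths; decide

theorem normalize_legacy_paths_tight : Claim_exact_normalize_legacy_paths := by
  intro html _ hd heq
  unfold D_normalize_legacy_paths at hd
  obtain ⟨j, hj8, i, hij, hj4, hisin⟩ := hd
  have hinf : (pvOldAt j).dropLast ++ pvOldAt i <:+: html.toList := by
    have h0 := (PySem.Str.isIn_iff_infix _ _).mp hisin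
    rwa [String.toList_ofList] at h0
  have hmem : (pvOldAt j).dropLast ++ pvOldAt i ∈ pvCascadeSubsL := by
    interval_cases j <;> interval_cases i <;> decide
  apply pvTight_bounded html.toList.length html.toList le_rfl ⟨_, hmem, hinf⟩
  have h1 : (normalize_legacy_paths html).toList = (normalize_legacy_paths_alt html).toList := by
    rw [heq]
  rw [pvA_toList] at h1
  have h2 : (normalize_legacy_paths_alt html).toList = pvScan html.toList := by
    unfold normalize_legacy_paths_alt
    rw [String.toList_ofList]
    rfl
  rw [h2] at h1
  exact h1
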